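-- pv_equiv track=rewrite | github.com/radiantcortex/Angel-Ai | Angel-Backend/routers/implementation_router.py | _calculate_phase_progress
-- ===== SOURCE A (Python) =====
-- from typing import Dict, List, Any, Optional
--
-- def _calculate_phase_progress(completed_tasks: List[str], phase_name: str) -> Dict[str, Any]:
--     """Calculate detailed progress for a specific phase"""
--     phase_tasks_map = {
--         "Legal Foundation": ["business_structure_selection", "business_registration", "tax_id_application", "permits_licenses", "insurance_requirements"],
--         "Financial Systems": ["business_bank_account", "accounting_system", "budget_planning", "funding_strategy", "financial_tracking"],
--         "Operations Setup": ["supply_chain_setup", "equipment_procurement", "operational_processes", "quality_control", "inventory_management"],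
--         "Marketing & Sales": ["brand_development", "marketing_strategy", "sales_process", "customer_acquisition", "digital_presence"],
--         "Launch & Growth": ["go_to_market", "team_building", "performance_monitoring", "growth_strategies", "customer_feedback"]
--     }
--
--     tasks = phase_tasks_map.get(phase_name, [])
--     if not tasks:
--         return {"completed": 0, "total": 0, "percent": 0}
--
--     completed_count = 0
--     for task in tasks:
--         if task in completed_tasks:
--             completed_count += 1
--         else:
--             # Check substeps
--             substep_count = sum(1 for completed in completed_tasks if completed.startswith(f"{task}_substep_"))
--             if substep_count >= 3:  # Most substeps completed = task done
--                 completed_count += 1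
--
--     return {
--         "completed": completed_count,
--         "total": len(tasks),
--         "percent": int((completed_count / len(tasks)) * 100) if tasks else 0
--     }
-- ===== SOURCE B (Python) =====
-- from typing import Dict, List, Any
--
-- def _calculate_phase_progress(completed_tasks: List[str], phase_name: str) -> Dict[str, Any]:
--     """Calculate detailed progress for a specific phase (one pass over completed_tasks)."""
--     phase_tasks_map = {
--         "Legal Foundation": ["business_structure_selection", "business_registration", "tax_id_application", "permits_licenses", "insurance_requirements"],
--         "Financial Systems": ["business_bank_account", "accounting_system", "budget_planning", "funding_strategy", "financial_tracking"],
--         "Operations Setup": ["supply_chain_setup", "equipment_procurement", "operational_processes", "quality_control", "inventory_management"],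
--         "Marketing & Sales": ["brand_development", "marketing_strategy", "sales_process", "customer_acquisition", "digital_presence"],
--         "Launch & Growth": ["go_to_market", "team_building", "performance_monitoring", "growth_strategies", "customer_feedback"]
--     }
--
--     tasks = phase_tasks_map.get(phase_name, [])
--     if not tasks:
--         return {"completed": 0, "total": 0, "percent": 0}
--
--     # One pass: exact completions as a set, substep completions bucketed by prefix.
--     exact = set(completed_tasks)
--     counts = {}
--     for c in completed_tasks:
--         i = c.find("_substep_")
--         if i != -1:
--             p = c[:i]
--             counts[p] = counts.get(p, 0) + 1
--
--     completed = sum(1 for t in tasks if t in exact or counts.get(t, 0) >= 3)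
--     total = len(tasks)
--     return {"completed": completed, "total": total, "percent": completed * 100 // total}
-- ===== Notes on version B (the rewrite author's own statement) =====
-- stated objective: alternative
-- what changed: Replaces A's per-task startswith scan over completed_tasks (one scan per phase task) with a single pass that builds a set of exact completions and a dict counting substeps by their '_substep_' prefix, then sums over the 5 phase tasks with O(1) lookups.
import Mathlib
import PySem

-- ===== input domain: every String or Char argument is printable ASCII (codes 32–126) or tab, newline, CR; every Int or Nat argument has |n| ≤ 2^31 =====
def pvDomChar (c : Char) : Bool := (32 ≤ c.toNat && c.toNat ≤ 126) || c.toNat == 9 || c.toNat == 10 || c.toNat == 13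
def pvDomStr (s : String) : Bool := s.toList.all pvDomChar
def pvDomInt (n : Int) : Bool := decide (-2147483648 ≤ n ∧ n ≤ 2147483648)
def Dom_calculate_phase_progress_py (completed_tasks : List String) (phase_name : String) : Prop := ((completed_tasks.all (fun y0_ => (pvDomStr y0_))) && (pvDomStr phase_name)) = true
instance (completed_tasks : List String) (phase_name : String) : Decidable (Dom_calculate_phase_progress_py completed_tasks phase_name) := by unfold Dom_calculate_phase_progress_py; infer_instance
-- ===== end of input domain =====

-- B replaces A's per-task scan over completed_tasks (a startswith count for every task) by ONE pass
-- building a set of exact completions and a prefix→count dict; objective: alternative/simpler shape.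

-- the module-level dict literal shared by both Python versions
def pvPhaseTasksMap : PySem.Dict String (List String) :=
  (((((PySem.Dict.empty.insert "Legal Foundation" ["business_structure_selection", "business_registration", "tax_id_application", "permits_licenses", "insurance_requirements"]).insert
    "Financial Systems" ["business_bank_account", "accounting_system", "budget_planning", "funding_strategy", "financial_tracking"]).insert
    "Operations Setup" ["supply_chain_setup", "equipment_procurement", "operational_processes", "quality_control", "inventory_management"]).insert
    "Marketing & Sales" ["brand_development", "marketing_strategy", "sales_process", "customer_acquisition", "digital_presence"]).insert
    "Launch & Growth" ["go_to_market", "team_building", "performance_monitoring", "growth_strategies", "customer_feedback"])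

-- ===== PORT A =====
def calculate_phase_progress_py (completed_tasks : List String) (phase_name : String) : List (String × Int) :=
  let tasks := pvPhaseTasksMap.getD phase_name []
  if tasks = [] then [("completed", 0), ("total", 0), ("percent", 0)]
  else
    let completed_count : Int := tasks.foldl (fun cc task =>
      if task ∈ completed_tasks then cc + 1
      else
        let substep_count : Int := completed_tasks.foldl
          (fun s c => if PySem.Str.startswith c (task ++ "_substep_") then s + 1 else s) 0
        if 3 ≤ substep_count then cc + 1 else cc) 0
    -- percent: Python computes int((cc/len(tasks))*100) in floats; exact as integer division here,
    -- since len(tasks) = 5 and 0 ≤ cc ≤ 5 (checked: int((c/5)*100) = c*100//5 for all c in 0..5)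
    [("completed", completed_count), ("total", (tasks.length : Int)),
     ("percent", if tasks = [] then 0 else PySem.Int.floordiv (completed_count * 100) (tasks.length : Int))]

-- ===== PORT B =====
def calculate_phase_progress_py_alt (completed_tasks : List String) (phase_name : String) : List (String × Int) :=
  let tasks := pvPhaseTasksMap.getD phase_name []
  if tasks = [] then [("completed", 0), ("total", 0), ("percent", 0)]
  else
    let exact : PySem.Set String := PySem.Set.ofList completed_tasks
    let counts : PySem.Dict String Int := completed_tasks.foldl (fun d c =>
      let i := PySem.Str.find c "_substep_"
      if i ≠ -1 then
        let p := PySem.Str.slice c none (some i)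
        d.insert p (d.getD p 0 + 1)
      else d) PySem.Dict.empty
    let completed : Int := tasks.foldl (fun acc t =>
      if t ∈ exact ∨ 3 ≤ counts.getD t 0 then acc + 1 else acc) 0
    let total : Int := (tasks.length : Int)
    [("completed", completed), ("total", total),
     ("percent", PySem.Int.floordiv (completed * 100) total)]

-- ===== PRECONDITION & SPEC =====
def Spec_calculate_phase_progress_py (completed_tasks : List String) (phase_name : String) (out : List (String × Int)) : Prop := out = calculate_phase_progress_py_alt completed_tasks phase_name
instance (completed_tasks : List String) (phase_name : String) (out : List (String × Int)) : Decidable (Spec_calculate_phase_progress_py completed_tasks phase_name out) := by unfold Spec_calculate_phase_progress_py; infer_instance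

-- ===== CLAIM (what is proved, stated in full; the proofs are below) =====
def Claim_equal_calculate_phase_progress_py : Prop := ∀ (completed_tasks : List String) (phase_name : String), Dom_calculate_phase_progress_py completed_tasks phase_name → Spec_calculate_phase_progress_py completed_tasks phase_name (calculate_phase_progress_py completed_tasks phase_name)

-- ===== LEMMAS AND PROOFS =====

-- a task name is "good" if "_substep_" first occurs in t ++ "_substep_" exactly at position t.length
-- (holds for all 25 concrete task names; checked by decide)
def pvGood (t : String) : Bool :=
  (List.range t.toList.length).all
    (fun j => !(decide ("_substep_".toList <+: ((t.toList ++ "_substep_".toList).drop j))))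

theorem pvGood_spec (t : String) (h : pvGood t = true) :
    ∀ j < t.toList.length, ¬ ("_substep_".toList <+: ((t.toList ++ "_substep_".toList).drop j)) := by
  intro j hj
  unfold pvGood at h
  rw [List.all_eq_true] at h
  have := h j (List.mem_range.mpr hj)
  simpa using this

-- first-occurrence characterisation, char level
theorem pvKeyChars (ts cs : List Char)
    (H : ∀ j < ts.length, ¬ ("_substep_".toList <+: ((ts ++ "_substep_".toList).drop j))) :
    ((ts ++ "_substep_".toList) <+: cs) ↔
      (PySem.Chars.find cs "_substep_".toList ≠ -1 ∧
       PySem.List.slice cs none (some (PySem.Chars.find cs "_substep_".toList)) = ts) := by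
  set ss := "_substep_".toList with hss
  constructor
  · intro hpre
    obtain ⟨r, hr⟩ := hpre
    have hinf : ss <:+: cs := by
      exact ⟨ts, r, hr⟩
    have h0 : 0 ≤ PySem.Chars.find cs ss := (PySem.Chars.find_nonneg_iff cs ss).mpr hinf
    obtain ⟨hat, hmin⟩ := PySem.Chars.find_spec h0
    set i := (PySem.Chars.find cs ss).toNat with hi
    have hfind : PySem.Chars.find cs ss = (i : Int) := (Int.toNat_of_nonneg h0).symm
    -- i ≤ ts.length by minimality (there's an occurrence at ts.length)
    have hoccL : ss <+: cs.drop ts.length := by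
      rw [← hr, List.append_assoc, List.drop_left]
      exact ⟨r, rfl⟩
    have hle : i ≤ ts.length := by
      by_contra hlt
      exact hmin ts.length (by omega) hoccL
    -- i < ts.length contradicts H
    have hieq : i = ts.length := by
      rcases Nat.lt_or_ge i ts.length with hlt | hge
      · exfalso
        have h9 : ss.length = 9 := by rw [hss]; decide
        have hdrop : cs.drop i = (ts ++ ss).drop i ++ r := by
          rw [← hr, List.drop_append_of_le_length
            (by simp only [List.length_append]; omega)]
        have hX : ss.length ≤ ((ts ++ ss).drop i).length := by
          simp only [List.length_drop, List.length_append]; omega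
        have hssX : ss <+: (ts ++ ss).drop i := by
          have h1 : ss = (((ts ++ ss).drop i) ++ r).take ss.length := by
            rw [← hdrop]
            exact List.prefix_iff_eq_take.mp (hdrop ▸ hat)
          rw [List.take_append_of_le_length hX] at h1
          rw [List.prefix_iff_eq_take]
          exact h1
        exact H i hlt hssX
      · omega
    refine ⟨by rw [hfind]; simp, ?_⟩
    rw [hfind, hieq]
    rw [PySem.List.slice_to_natCast]
    rw [← hr, List.append_assoc, List.take_left]
  · rintro ⟨hne, hslice⟩
    have hinf : ss <:+: cs := (PySem.Chars.find_ne_neg_one_iff cs ss).mp hne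
    have h0 : 0 ≤ PySem.Chars.find cs ss := (PySem.Chars.find_nonneg_iff cs ss).mpr hinf
    obtain ⟨hat, -⟩ := PySem.Chars.find_spec h0
    rw [PySem.List.slice_to cs h0] at hslice
    obtain ⟨u, hu⟩ := hat
    refine ⟨u, ?_⟩
    calc ts ++ ss ++ u = ts ++ (ss ++ u) := by rw [List.append_assoc]
      _ = cs.take (PySem.Chars.find cs ss).toNat ++ cs.drop (PySem.Chars.find cs ss).toNat := by
          rw [hslice, hu]
      _ = cs := List.take_append_drop _ _

-- the same characterisation at String level, as a Bool-predicate equality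
theorem pvKey (t : String) (hg : pvGood t = true) (c : String) :
    PySem.Str.startswith c (t ++ "_substep_")
      = ((PySem.Str.slice c none (some (PySem.Str.find c "_substep_")) == t)
          && !(PySem.Str.find c "_substep_" == -1)) := by
  have H := pvGood_spec t hg
  have key := pvKeyChars t.toList c.toList H
  have hfind : PySem.Str.find c "_substep_" = PySem.Chars.find c.toList "_substep_".toList :=
    PySem.Str.find_eq c "_substep_"
  have hsw : PySem.Str.startswith c (t ++ "_substep_")
      = PySem.Chars.startswith c.toList (t.toList ++ "_substep_".toList) := by
    rw [PySem.Str.startswith_eq, String.toList_append]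
  have hsl : (PySem.Str.slice c none (some (PySem.Str.find c "_substep_"))).toList
      = PySem.List.slice c.toList none (some (PySem.Chars.find c.toList "_substep_".toList)) := by
    rw [PySem.Str.toList_slice, PySem.Chars.slice_eq_listSlice, hfind]
  apply Bool.eq_iff_iff.mpr
  constructor
  · intro h
    rw [hsw] at h
    have hp : (t.toList ++ "_substep_".toList) <+: c.toList :=
      (PySem.Chars.startswith_iff _ _).mp h
    obtain ⟨h1, h2⟩ := key.mp hp
    have hst : PySem.Str.slice c none (some (PySem.Str.find c "_substep_")) = t := by
      rw [← String.toList_inj, hsl]; exact h2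
    rw [hst, Bool.and_eq_true, Bool.not_eq_true', beq_eq_false_iff_ne]
    exact ⟨beq_self_eq_true t, by rw [hfind]; exact h1⟩
  · intro h
    rw [Bool.and_eq_true, beq_iff_eq, Bool.not_eq_true', beq_eq_false_iff_ne] at h
    obtain ⟨h2, h1⟩ := h
    have hp := key.mpr ⟨by rw [← hfind]; exact h1, by rw [← hsl, h2]⟩
    rw [hsw]
    exact (PySem.Chars.startswith_iff _ _).mpr hp

-- B's counts dict looked up at t is exactly the number of completed strings whose
-- "_substep_" prefix is t
theorem pvCountsGetD (l : List String) (t : String) :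
    (l.foldl (fun d c =>
        if PySem.Str.find c "_substep_" ≠ -1 then
          (d : PySem.Dict String Int).insert
            (PySem.Str.slice c none (some (PySem.Str.find c "_substep_")))
            (d.getD (PySem.Str.slice c none (some (PySem.Str.find c "_substep_"))) 0 + 1)
        else d) PySem.Dict.empty).getD t 0
      = (l.countP (fun c =>
          (PySem.Str.slice c none (some (PySem.Str.find c "_substep_")) == t)
            && !(PySem.Str.find c "_substep_" == -1)) : Int) := by
  have hfold :
      (l.foldl (fun d c =>
        if PySem.Str.find c "_substep_" ≠ -1 then
          (d : PySem.Dict String Int).insert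
            (PySem.Str.slice c none (some (PySem.Str.find c "_substep_")))
            (d.getD (PySem.Str.slice c none (some (PySem.Str.find c "_substep_"))) 0 + 1)
        else d) PySem.Dict.empty)
      = (((l.filter (fun c => !(PySem.Str.find c "_substep_" == -1))).map
            (fun c => PySem.Str.slice c none (some (PySem.Str.find c "_substep_")))).foldl
          (fun d p => d.insert p (d.getD p 0 + 1)) PySem.Dict.empty) := by
    rw [List.foldl_map, List.foldl_filter]
    apply PySem.List.foldl_congr_mem
    intro d c _
    simp only [Bool.not_eq_eq_eq_not, Bool.not_true, beq_eq_false_iff_ne, ne_eq]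
  rw [hfold, PySem.Dict.getD_foldl_insert_add_one, PySem.Dict.getD_empty,
    List.count_eq_countP, List.countP_map, List.countP_filter]
  simp [Function.comp]

-- every task in the phase map is a good task name (no early "_substep_" occurrence)
theorem pvTasksGood (phase_name : String) :
    ∀ t ∈ pvPhaseTasksMap.getD phase_name [], pvGood t = true := by
  unfold pvPhaseTasksMap
  simp only [PySem.Dict.getD_insert, PySem.Dict.getD_empty]
  split_ifs <;> decide

-- the two completed-count loops agree when every task is good
theorem pvCountEq (completed_tasks : List String) (tasks : List String)
    (hg : ∀ t ∈ tasks, pvGood t = true) :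
    tasks.foldl (fun cc task =>
      if task ∈ completed_tasks then cc + 1
      else
        if 3 ≤ completed_tasks.foldl
            (fun s c => if PySem.Str.startswith c (task ++ "_substep_") then s + 1 else s)
            (0 : Int)
        then cc + 1 else cc) (0 : Int)
    = tasks.foldl (fun acc t =>
        if t ∈ PySem.Set.ofList completed_tasks ∨
            3 ≤ (completed_tasks.foldl (fun d c =>
              if PySem.Str.find c "_substep_" ≠ -1 then
                (d : PySem.Dict String Int).insert
                  (PySem.Str.slice c none (some (PySem.Str.find c "_substep_")))
                  (d.getD (PySem.Str.slice c none (some (PySem.Str.find c "_substep_"))) 0 + 1)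
              else d) PySem.Dict.empty).getD t 0
          then acc + 1 else acc) (0 : Int) := by
  apply PySem.List.foldl_congr_mem
  intro acc t ht
  have hmem : (t ∈ PySem.Set.ofList completed_tasks) ↔ t ∈ completed_tasks :=
    PySem.Set.mem_ofList completed_tasks t
  have hsub : completed_tasks.foldl
      (fun s c => if PySem.Str.startswith c (t ++ "_substep_") then s + 1 else s) (0 : Int)
      = (completed_tasks.foldl (fun d c =>
          if PySem.Str.find c "_substep_" ≠ -1 then
            (d : PySem.Dict String Int).insert
              (PySem.Str.slice c none (some (PySem.Str.find c "_substep_")))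
              (d.getD (PySem.Str.slice c none (some (PySem.Str.find c "_substep_"))) 0 + 1)
          else d) PySem.Dict.empty).getD t 0 := by
    rw [pvCountsGetD, PySem.List.foldl_if_add_one, Int.zero_add]
    congr 1
    apply List.countP_congr
    intro c _
    rw [pvKey t (hg t ht) c]
  rw [hsub]
  by_cases hm : t ∈ completed_tasks <;> simp [hm, hmem]

-- ===== VERDICT (by name: the statement is the Claim_ definition above) =====
theorem calculate_phase_progress_py_spec : Claim_equal_calculate_phase_progress_py := by
  intro completed_tasks phase_name _
  unfold Spec_calculate_phase_progress_py
  unfold calculate_phase_progress_py calculate_phase_progress_py_alt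
  by_cases h : pvPhaseTasksMap.getD phase_name [] = []
  · simp [h]
  · simp only [if_neg h]
    rw [pvCountEq completed_tasks (pvPhaseTasksMap.getD phase_name [])
      (pvTasksGood phase_name)]
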